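-- pv_equiv track=rewrite | github.com/PopularAtacarejo/Placas | PR2/atualizar_por_planilha.py | detectar_colunas
-- ===== SOURCE A (Python) =====
-- from typing import Any, Callable, Dict, List, Optional, Sequence, Tuple
--
-- def detectar_colunas(cabecalho: Sequence[str]) -> Optional[Dict[str, int]]:
--     desc_idx = None
--     unid_idx = None
--     preco_idx = None
--     data_idx = None
--
--     for i, col in enumerate(cabecalho):
--         c = col.lower()
--         if desc_idx is None and any(k in c for k in ("descricao", "descri", "produto", "item")):
--             desc_idx = i
--         if unid_idx is None and any(k in c for k in ("unid", "unidade", "medida")):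
--             unid_idx = i
--         if preco_idx is None and any(k in c for k in ("preco", "valor", "venda", "oferta")):
--             preco_idx = i
--         if data_idx is None and any(k in c for k in ("data", "validade", "venc", "ate", "até")):
--             data_idx = i
--
--     if desc_idx is None or preco_idx is None:
--         return None
--
--     return {
--         "descricao": desc_idx,
--         "unidade": unid_idx if unid_idx is not None else -1,
--         "preco": preco_idx,
--         "validade_oferta": data_idx if data_idx is not None else -1,
--     }
-- ===== SOURCE B (Python) =====
-- def detectar_colunas(cabecalho):
--     def achar(kws):
--         return next((i for i, col in enumerate(cabecalho)
--                      if any(k in col.lower() for k in kws)), None)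
--
--     desc_idx = achar(("descricao", "descri", "produto", "item"))
--     preco_idx = achar(("preco", "valor", "venda", "oferta"))
--     if desc_idx is None or preco_idx is None:
--         return None
--     unid_idx = achar(("unid", "unidade", "medida"))
--     data_idx = achar(("data", "validade", "venc", "ate", "até"))
--     return {
--         "descricao": desc_idx,
--         "unidade": unid_idx if unid_idx is not None else -1,
--         "preco": preco_idx,
--         "validade_oferta": data_idx if data_idx is not None else -1,
--     }
-- ===== Notes on version B (the rewrite author's own statement) =====
-- stated objective: idiomatic
-- what changed: One combined pass maintaining four Option accumulators is replaced by an independent first-match scan per field (next over a generator), with the descricao/preco guard before the optional fields are even looked up.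
import Mathlib
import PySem

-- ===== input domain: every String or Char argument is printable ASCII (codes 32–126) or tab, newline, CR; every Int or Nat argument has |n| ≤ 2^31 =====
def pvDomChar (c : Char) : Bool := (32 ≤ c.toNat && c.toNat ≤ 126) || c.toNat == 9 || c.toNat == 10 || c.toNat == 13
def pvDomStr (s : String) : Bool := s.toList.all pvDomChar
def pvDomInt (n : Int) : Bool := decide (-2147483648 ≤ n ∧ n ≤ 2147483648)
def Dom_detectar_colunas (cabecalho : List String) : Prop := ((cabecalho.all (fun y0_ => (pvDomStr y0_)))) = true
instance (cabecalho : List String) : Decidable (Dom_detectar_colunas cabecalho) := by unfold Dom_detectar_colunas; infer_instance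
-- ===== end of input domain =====

-- ===== PORT A =====
-- B restructures A's single four-accumulator pass into one independent first-match scan per field (idiomatic decomposition).
-- A-side helpers
def pvKwDesc : List String := ["descricao", "descri", "produto", "item"]
def pvKwUnid : List String := ["unid", "unidade", "medida"]
def pvKwPreco : List String := ["preco", "valor", "venda", "oferta"]
def pvKwData : List String := ["data", "validade", "venc", "ate", "até"]

def pvStep (s : Option Int × Option Int × Option Int × Option Int) (p : Int × String) :
    Option Int × Option Int × Option Int × Option Int :=
  let c := PySem.Str.lower p.2
  (if s.1.isNone && pvKwDesc.any (fun k => PySem.Str.isIn k c) then some p.1 else s.1,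
   if s.2.1.isNone && pvKwUnid.any (fun k => PySem.Str.isIn k c) then some p.1 else s.2.1,
   if s.2.2.1.isNone && pvKwPreco.any (fun k => PySem.Str.isIn k c) then some p.1 else s.2.2.1,
   if s.2.2.2.isNone && pvKwData.any (fun k => PySem.Str.isIn k c) then some p.1 else s.2.2.2)

def detectar_colunas (cabecalho : List String) : Option (List (String × Int)) :=
  let st := (PySem.List.enumerate cabecalho 0).foldl pvStep (none, none, none, none)
  match st with
  | (desc_idx, unid_idx, preco_idx, data_idx) =>
    if desc_idx.isNone || preco_idx.isNone then none
    else some [("descricao", desc_idx.getD 0),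
               ("unidade", unid_idx.getD (-1)),
               ("preco", preco_idx.getD 0),
               ("validade_oferta", data_idx.getD (-1))]

-- ===== PORT B =====
-- B-side helper: first index whose lowered column contains one of the keywords (a separate scan per field)
def pvAchar (cabecalho : List String) (kws : List String) : Option Int :=
  ((PySem.List.enumerate cabecalho 0).find?
      (fun p => kws.any (fun k => PySem.Str.isIn k (PySem.Str.lower p.2)))).map (·.1)

def detectar_colunas_alt (cabecalho : List String) : Option (List (String × Int)) :=
  match pvAchar cabecalho pvKwDesc, pvAchar cabecalho pvKwPreco with
  | some desc_idx, some preco_idx =>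
    some [("descricao", desc_idx),
          ("unidade", (pvAchar cabecalho pvKwUnid).getD (-1)),
          ("preco", preco_idx),
          ("validade_oferta", (pvAchar cabecalho pvKwData).getD (-1))]
  | _, _ => none

-- ===== PRECONDITION & SPEC =====
def Spec_detectar_colunas (cabecalho : List String) (out : Option (List (String × Int))) : Prop := out = detectar_colunas_alt cabecalho
instance (cabecalho : List String) (out : Option (List (String × Int))) : Decidable (Spec_detectar_colunas cabecalho out) := by unfold Spec_detectar_colunas; infer_instance

-- ===== CLAIM (what is proved, stated in full; the proofs are below) =====
def Claim_equal_detectar_colunas : Prop := ∀ (cabecalho : List String), Dom_detectar_colunas cabecalho → Spec_detectar_colunas cabecalho (detectar_colunas cabecalho)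

-- ===== LEMMAS AND PROOFS =====
-- first-match characterisation of one accumulator component of A's fold
def pvComp (s : Option Int) (p : Int × String → Bool) (l : List (Int × String)) : Option Int :=
  s.or ((l.find? p).map (·.1))

def pvPred (kws : List String) : Int × String → Bool :=
  fun q => kws.any (fun k => PySem.Str.isIn k (PySem.Str.lower q.2))

theorem pvComp_cons (s : Option Int) (kws : List String) (x : Int × String) (l : List (Int × String)) :
    pvComp s (pvPred kws) (x :: l)
      = pvComp (if s.isNone && kws.any (fun k => PySem.Str.isIn k (PySem.Str.lower x.2)) then some x.1 else s)
          (pvPred kws) l := by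
  cases s with
  | none =>
    cases h : kws.any (fun k => PySem.Str.isIn k (PySem.Str.lower x.2)) with
    | true =>
      have h' : pvPred kws x = true := h
      simp only [pvComp, Option.isNone_none, Bool.true_and, if_true, Option.none_or,
        List.find?_cons_of_pos h', Option.some_or, Option.map_some]
    | false =>
      have h0 : pvPred kws x = false := h
      have h' : ¬ pvPred kws x = true := by simp [h0]
      simp only [pvComp, Option.isNone_none, Bool.true_and, Bool.false_eq_true, if_false,
        Option.none_or, List.find?_cons_of_neg h']
  | some v => simp [pvComp]

-- the combined fold computes the four independent first-match scans
theorem pvFold_eq (l : List (Int × String)) (a b c d : Option Int) :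
    l.foldl pvStep (a, b, c, d)
      = (pvComp a (pvPred pvKwDesc) l, pvComp b (pvPred pvKwUnid) l,
         pvComp c (pvPred pvKwPreco) l, pvComp d (pvPred pvKwData) l) := by
  induction l generalizing a b c d with
  | nil => simp [pvComp]
  | cons x t ih =>
    rw [List.foldl_cons, pvStep, ih,
      pvComp_cons a pvKwDesc x t, pvComp_cons b pvKwUnid x t,
      pvComp_cons c pvKwPreco x t, pvComp_cons d pvKwData x t]

theorem pvFold_eq_achar (cab : List String) :
    (PySem.List.enumerate cab 0).foldl pvStep (none, none, none, none)
      = (pvAchar cab pvKwDesc, pvAchar cab pvKwUnid, pvAchar cab pvKwPreco, pvAchar cab pvKwData) := by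
  rw [pvFold_eq]
  rfl

-- ===== VERDICT (by name: the statement is the Claim_ definition above) =====
theorem detectar_colunas_spec : Claim_equal_detectar_colunas := by
  intro cab _
  show detectar_colunas cab = detectar_colunas_alt cab
  unfold detectar_colunas detectar_colunas_alt
  rw [pvFold_eq_achar]
  rcases hd : pvAchar cab pvKwDesc with _ | dv <;> rcases hp : pvAchar cab pvKwPreco with _ | pv <;> simp
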